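-- pv_equiv track=rewrite | github.com/soumyaawasthi-work/SkillModBot | bot.py | parse_pairs_input
-- ===== SOURCE A (Python) =====
-- HERO_DATA = {
--     "Chenko": [("DamageUp", 101, 0.25)],
--     "Amadeus": [("DamageUp", 101, 0.25)],
--     "Yeonwoo": [("DamageUp", 101, 0.25)],
--     "Amane": [("DamageUp", 102, 0.25)],
--     "Howard": [("DefenseUp", 111, 0.20)],
--     "Quinn": [("DefenseUp", 111, 0.20)],
--     "Gordon": [("DefenseUp", 113, 0.25)],
--     "Fahd": [("OppDamageDown", 201, 0.20)],
--     "Saul": [("DefenseUp", 112, 0.10), ("DefenseUp", 113, 0.15)],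
--     "Hilde": [("DefenseUp", 112, 0.10), ("DamageUp", 102, 0.15)],
--     "Eric": [("OppDamageDown", 202, 0.20)],
--     "Margot": [("DamageUp", 102, 0.25)],
-- }
--
-- def parse_pairs_input(args_dict):
--     """
--     Accepts a mapping of hero_name->count from slash command fields.
--     Normalizes names (case-insensitive) to canonical keys.
--     """
--     normalized = {}
--     for raw_name, cnt in args_dict.items():
--         if not raw_name:
--             continue
--         # match case-insensitive
--         matched = None
--         for h in HERO_DATA:
--             if h.lower() == raw_name.lower():
--                 matched = h
--                 break
--         if not matched:
--             raise KeyError(raw_name)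
--         if cnt is None or cnt <= 0:
--             continue
--         normalized[matched] = normalized.get(matched, 0) + int(cnt)
--     return normalized
-- ===== SOURCE B (Python) =====
-- HERO_DATA = {
--     "Chenko": [("DamageUp", 101, 0.25)],
--     "Amadeus": [("DamageUp", 101, 0.25)],
--     "Yeonwoo": [("DamageUp", 101, 0.25)],
--     "Amane": [("DamageUp", 102, 0.25)],
--     "Howard": [("DefenseUp", 111, 0.20)],
--     "Quinn": [("DefenseUp", 111, 0.20)],
--     "Gordon": [("DefenseUp", 113, 0.25)],
--     "Fahd": [("OppDamageDown", 201, 0.20)],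
--     "Saul": [("DefenseUp", 112, 0.10), ("DefenseUp", 113, 0.15)],
--     "Hilde": [("DefenseUp", 112, 0.10), ("DamageUp", 102, 0.15)],
--     "Eric": [("OppDamageDown", 202, 0.20)],
--     "Margot": [("DamageUp", 102, 0.25)],
-- }
--
-- _CANON = {h.lower(): h for h in HERO_DATA}
--
--
-- def parse_pairs_input(args_dict):
--     # Staged group-by pipeline instead of A's single accumulating loop:
--     # 1) validate every non-empty name, 2) extract (canonical, count) pairs
--     # with positive counts, 3) dedup canonical names in first-seen order,
--     # 4) sum per canonical name.
--     for raw_name in args_dict: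
--         if raw_name and raw_name.lower() not in _CANON:
--             raise KeyError(raw_name)
--     positives = [(_CANON[raw.lower()], int(cnt))
--                  for raw, cnt in args_dict.items()
--                  if raw and cnt is not None and cnt > 0]
--     order = []
--     for h, _ in positives:
--         if h not in order:
--             order.append(h)
--     return {h: sum(c for k, c in positives if k == h) for h in order}
-- ===== Notes on version B (the rewrite author's own statement) =====
-- stated objective: alternative
-- what changed: A's single pass that accumulates into a dict with an inner case-insensitive scan per name is replaced by a staged group-by pipeline: validate all names against a module-level reverse index, extract the positive (canonical, count) pairs, dedup names in first-seen order, then build the result by summing per canonical name.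
import Mathlib
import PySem

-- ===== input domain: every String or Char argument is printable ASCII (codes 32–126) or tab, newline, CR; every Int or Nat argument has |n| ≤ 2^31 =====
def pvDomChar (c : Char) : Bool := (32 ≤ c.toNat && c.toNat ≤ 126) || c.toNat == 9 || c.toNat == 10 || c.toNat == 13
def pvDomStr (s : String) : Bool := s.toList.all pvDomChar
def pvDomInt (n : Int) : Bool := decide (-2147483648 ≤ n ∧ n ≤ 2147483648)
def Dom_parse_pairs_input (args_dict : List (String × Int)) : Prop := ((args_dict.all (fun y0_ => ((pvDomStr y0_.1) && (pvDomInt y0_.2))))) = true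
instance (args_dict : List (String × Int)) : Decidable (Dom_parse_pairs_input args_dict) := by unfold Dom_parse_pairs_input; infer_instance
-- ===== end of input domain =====

-- B replaces A's single accumulating loop (inner case-insensitive scan + running dict)
-- by a staged group-by pipeline: validate names via a module-level reverse index,
-- extract positive (canonical, count) pairs, dedup names first-seen, sum per name
-- (objective: alternative). Both raise KeyError on an unmatched non-empty name;
-- those inputs are outside Pre_.

-- ===== PORT A =====
-- keys of HERO_DATA, in insertion order
def heroNames : List String :=
  ["Chenko", "Amadeus", "Yeonwoo", "Amane", "Howard", "Quinn",
   "Gordon", "Fahd", "Saul", "Hilde", "Eric", "Margot"]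

-- A's inner loop: first h in HERO_DATA with h.lower() == raw.lower()
def matchA (raw : String) : Option String :=
  heroNames.find? (fun h => PySem.Str.lower h == PySem.Str.lower raw)

-- A's main loop over args_dict.items(); the `none` branch is the KeyError (outside Pre_)
def goA : List (String × Int) → PySem.Dict String Int → PySem.Dict String Int
  | [], normalized => normalized
  | (raw, cnt) :: rest, normalized =>
    if raw = "" then goA rest normalized
    else
      match matchA raw with
      | none => normalized  -- raise KeyError(raw_name): unreachable under Pre_
      | some matched =>
        if cnt ≤ 0 then goA rest normalized
        else goA rest (normalized.insert matched (normalized.getD matched 0 + cnt))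

def parse_pairs_input (args_dict : List (String × Int)) : List (String × Int) :=
  (goA args_dict PySem.Dict.empty).items

-- ===== PORT B =====
-- module-level reverse index: _CANON = {h.lower(): h for h in HERO_DATA}
def canonB : PySem.Dict String String :=
  PySem.Dict.ofList (heroNames.map (fun h => (PySem.Str.lower h, h)))

-- stage 2: the positive (canonical, count) pairs (the list comprehension)
def positivesB (args_dict : List (String × Int)) : List (String × Int) :=
  args_dict.filterMap (fun p =>
    if p.1 ≠ "" ∧ 0 < p.2 then
      (canonB.get? (PySem.Str.lower p.1)).map (fun h => (h, p.2))
    else none)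

-- stage 3: `for h, _ in positives: if h not in order: order.append(h)`
def orderB (positives : List (String × Int)) : List String :=
  positives.foldl (fun acc p => if p.1 ∈ acc then acc else acc ++ [p.1]) []

def parse_pairs_input_alt (args_dict : List (String × Int)) : List (String × Int) :=
  -- stage 1: validation pass; the `else` branch is the KeyError (outside Pre_)
  if args_dict.all (fun p => p.1 == "" || (canonB.get? (PySem.Str.lower p.1)).isSome) then
    let positives := positivesB args_dict
    (orderB positives).map (fun h =>
      (h, ((positives.filter (fun p => p.1 == h)).map (·.2)).sum))
  else []

-- ===== PRECONDITION & SPEC =====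
-- Pre_ excludes exactly the inputs on which A (and B) raise KeyError:
-- some non-empty name with no case-insensitive match among HERO_DATA's keys.
def Pre_parse_pairs_input (args_dict : List (String × Int)) : Prop :=
  ∀ p ∈ args_dict, p.1 ≠ "" → PySem.Str.lower p.1 ∈ heroNames.map PySem.Str.lower

instance (args_dict : List (String × Int)) : Decidable (Pre_parse_pairs_input args_dict) := by
  unfold Pre_parse_pairs_input; infer_instance

def pvWitness_parse_pairs_input : (List (String × Int)) :=
  [("chenko", 2), ("Saul", 1), ("CHENKO", 3), ("", 7), ("quinn", 0)]

def Spec_parse_pairs_input (args_dict : List (String × Int)) (out : List (String × Int)) : Prop :=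
  out = parse_pairs_input_alt args_dict
instance (args_dict : List (String × Int)) (out : List (String × Int)) : Decidable (Spec_parse_pairs_input args_dict out) := by unfold Spec_parse_pairs_input; infer_instance

-- ===== CLAIM =====
def Claim_equal_parse_pairs_input : Prop := ∀ (args_dict : List (String × Int)), Dom_parse_pairs_input args_dict → Pre_parse_pairs_input args_dict → Spec_parse_pairs_input args_dict (parse_pairs_input args_dict)

-- ===== LEMMAS AND PROOFS =====

theorem canonB_eq_mk : canonB = PySem.Dict.mk [("chenko", "Chenko"), ("amadeus", "Amadeus"), ("yeonwoo", "Yeonwoo"), ("amane", "Amane"), ("howard", "Howard"), ("quinn", "Quinn"), ("gordon", "Gordon"), ("fahd", "Fahd"), ("saul", "Saul"), ("hilde", "Hilde"), ("eric", "Eric"), ("margot", "Margot")] := by rfl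

-- the reverse index agrees with A's linear scan on every raw name
theorem canonB_get?_eq_matchA (raw : String) :
    canonB.get? (PySem.Str.lower raw) = matchA raw := by
  simp only [canonB_eq_mk, matchA, heroNames, List.find?,
    PySem.Dict.get?_mk_cons,
    show PySem.Str.lower "Chenko" = "chenko" from rfl,
    show PySem.Str.lower "Amadeus" = "amadeus" from rfl,
    show PySem.Str.lower "Yeonwoo" = "yeonwoo" from rfl,
    show PySem.Str.lower "Amane" = "amane" from rfl,
    show PySem.Str.lower "Howard" = "howard" from rfl,
    show PySem.Str.lower "Quinn" = "quinn" from rfl,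
    show PySem.Str.lower "Gordon" = "gordon" from rfl,
    show PySem.Str.lower "Fahd" = "fahd" from rfl,
    show PySem.Str.lower "Saul" = "saul" from rfl,
    show PySem.Str.lower "Hilde" = "hilde" from rfl,
    show PySem.Str.lower "Eric" = "eric" from rfl,
    show PySem.Str.lower "Margot" = "margot" from rfl,
    show (PySem.Dict.mk ([] : List (String × String))).get? = fun _ => none from rfl]
  by_cases h1 : "chenko" = PySem.Str.lower raw
  · simp [h1]
  ·
    by_cases h2 : "amadeus" = PySem.Str.lower raw
    · simp [h2, beq_eq_false_iff_ne.mpr h1]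
    ·
      by_cases h3 : "yeonwoo" = PySem.Str.lower raw
      · simp [h3, beq_eq_false_iff_ne.mpr h1, beq_eq_false_iff_ne.mpr h2]
      ·
        by_cases h4 : "amane" = PySem.Str.lower raw
        · simp [h4, beq_eq_false_iff_ne.mpr h1, beq_eq_false_iff_ne.mpr h2, beq_eq_false_iff_ne.mpr h3]
        ·
          by_cases h5 : "howard" = PySem.Str.lower raw
          · simp [h5, beq_eq_false_iff_ne.mpr h1, beq_eq_false_iff_ne.mpr h2, beq_eq_false_iff_ne.mpr h3, beq_eq_false_iff_ne.mpr h4]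
          ·
            by_cases h6 : "quinn" = PySem.Str.lower raw
            · simp [h6, beq_eq_false_iff_ne.mpr h1, beq_eq_false_iff_ne.mpr h2, beq_eq_false_iff_ne.mpr h3, beq_eq_false_iff_ne.mpr h4, beq_eq_false_iff_ne.mpr h5]
            ·
              by_cases h7 : "gordon" = PySem.Str.lower raw
              · simp [h7, beq_eq_false_iff_ne.mpr h1, beq_eq_false_iff_ne.mpr h2, beq_eq_false_iff_ne.mpr h3, beq_eq_false_iff_ne.mpr h4, beq_eq_false_iff_ne.mpr h5, beq_eq_false_iff_ne.mpr h6]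
              ·
                by_cases h8 : "fahd" = PySem.Str.lower raw
                · simp [h8, beq_eq_false_iff_ne.mpr h1, beq_eq_false_iff_ne.mpr h2, beq_eq_false_iff_ne.mpr h3, beq_eq_false_iff_ne.mpr h4, beq_eq_false_iff_ne.mpr h5, beq_eq_false_iff_ne.mpr h6, beq_eq_false_iff_ne.mpr h7]
                ·
                  by_cases h9 : "saul" = PySem.Str.lower raw
                  · simp [h9, beq_eq_false_iff_ne.mpr h1, beq_eq_false_iff_ne.mpr h2, beq_eq_false_iff_ne.mpr h3, beq_eq_false_iff_ne.mpr h4, beq_eq_false_iff_ne.mpr h5, beq_eq_false_iff_ne.mpr h6, beq_eq_false_iff_ne.mpr h7, beq_eq_false_iff_ne.mpr h8]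
                  ·
                    by_cases h10 : "hilde" = PySem.Str.lower raw
                    · simp [h10, beq_eq_false_iff_ne.mpr h1, beq_eq_false_iff_ne.mpr h2, beq_eq_false_iff_ne.mpr h3, beq_eq_false_iff_ne.mpr h4, beq_eq_false_iff_ne.mpr h5, beq_eq_false_iff_ne.mpr h6, beq_eq_false_iff_ne.mpr h7, beq_eq_false_iff_ne.mpr h8, beq_eq_false_iff_ne.mpr h9]
                    ·
                      by_cases h11 : "eric" = PySem.Str.lower raw
                      · simp [h11, beq_eq_false_iff_ne.mpr h1, beq_eq_false_iff_ne.mpr h2, beq_eq_false_iff_ne.mpr h3, beq_eq_false_iff_ne.mpr h4, beq_eq_false_iff_ne.mpr h5, beq_eq_false_iff_ne.mpr h6, beq_eq_false_iff_ne.mpr h7, beq_eq_false_iff_ne.mpr h8, beq_eq_false_iff_ne.mpr h9, beq_eq_false_iff_ne.mpr h10]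
                      ·
                        by_cases h12 : "margot" = PySem.Str.lower raw
                        · simp [h12, beq_eq_false_iff_ne.mpr h1, beq_eq_false_iff_ne.mpr h2, beq_eq_false_iff_ne.mpr h3, beq_eq_false_iff_ne.mpr h4, beq_eq_false_iff_ne.mpr h5, beq_eq_false_iff_ne.mpr h6, beq_eq_false_iff_ne.mpr h7, beq_eq_false_iff_ne.mpr h8, beq_eq_false_iff_ne.mpr h9, beq_eq_false_iff_ne.mpr h10, beq_eq_false_iff_ne.mpr h11]
                        · simp [beq_eq_false_iff_ne.mpr h1, beq_eq_false_iff_ne.mpr h2, beq_eq_false_iff_ne.mpr h3, beq_eq_false_iff_ne.mpr h4, beq_eq_false_iff_ne.mpr h5, beq_eq_false_iff_ne.mpr h6, beq_eq_false_iff_ne.mpr h7, beq_eq_false_iff_ne.mpr h8, beq_eq_false_iff_ne.mpr h9, beq_eq_false_iff_ne.mpr h10, beq_eq_false_iff_ne.mpr h11, beq_eq_false_iff_ne.mpr h12]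

-- the pure accumulation loop A performs on the positive matched pairs
def accum (ps : List (String × Int)) (d : PySem.Dict String Int) : PySem.Dict String Int :=
  ps.foldl (fun d p => d.insert p.1 (d.getD p.1 0 + p.2)) d

-- Under Pre_, A's loop is exactly `accum` over B's positives list
theorem goA_eq_accum (l : List (String × Int)) (d : PySem.Dict String Int)
    (hpre : ∀ p ∈ l, p.1 ≠ "" → PySem.Str.lower p.1 ∈ heroNames.map PySem.Str.lower) :
    goA l d = accum (positivesB l) d := by
  induction l generalizing d with
  | nil => rfl
  | cons p rest ih =>
    obtain ⟨raw, cnt⟩ := p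
    have hrest : ∀ p ∈ rest, p.1 ≠ "" → PySem.Str.lower p.1 ∈ heroNames.map PySem.Str.lower :=
      fun q hq => hpre q (List.mem_cons_of_mem _ hq)
    by_cases hraw : raw = ""
    · have hskip : positivesB ((raw, cnt) :: rest) = positivesB rest := by
        simp [positivesB, hraw]
      rw [hskip]
      simp only [goA, if_pos hraw]
      exact ih d hrest
    · have hmem := hpre (raw, cnt) List.mem_cons_self hraw
      have hsome : (matchA raw).isSome = true := by
        unfold matchA
        rw [List.find?_isSome]
        obtain ⟨h, hh, hlow⟩ := List.mem_map.mp hmem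
        exact ⟨h, hh, by simp [hlow]⟩
      obtain ⟨m, hm⟩ := Option.isSome_iff_exists.mp hsome
      by_cases hcnt : cnt ≤ 0
      · have hcond : ¬ (raw ≠ "" ∧ 0 < cnt) := fun h => absurd h.2 (not_lt.mpr hcnt)
        have hskip : positivesB ((raw, cnt) :: rest) = positivesB rest := by
          simp [positivesB, hcond]
        rw [hskip]
        simp only [goA, if_neg hraw, hm, if_pos hcnt]
        exact ih d hrest
      · have hcond : raw ≠ "" ∧ 0 < cnt := ⟨hraw, by omega⟩
        have hkeep : positivesB ((raw, cnt) :: rest) = (m, cnt) :: positivesB rest := by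
          simp [positivesB, hcond, canonB_get?_eq_matchA, hm]
        rw [hkeep]
        simp only [goA, if_neg hraw, hm, if_neg hcnt, accum, List.foldl_cons]
        exact ih _ hrest

-- running sum of `accum`
theorem getD_accum (ps : List (String × Int)) (d : PySem.Dict String Int) (h : String) :
    (accum ps d).getD h 0 = d.getD h 0 + ((ps.filter (fun p => p.1 == h)).map (·.2)).sum := by
  induction ps generalizing d with
  | nil => simp [accum]
  | cons p rest ih =>
    simp only [accum, List.foldl_cons] at *
    rw [ih, List.filter_cons]
    by_cases hk : p.1 = h
    · rw [PySem.Dict.getD_insert, if_pos hk.symm]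
      simp only [hk, BEq.rfl, if_true, List.map_cons, List.sum_cons]
      ring
    · rw [PySem.Dict.getD_insert, if_neg (fun he => hk he.symm)]
      simp [beq_eq_false_iff_ne.mpr hk]

-- proof helper: Set.add written as B's explicit membership test
theorem foldl_add_key_eq (ps : List (String × Int)) (acc : List String) :
    ps.foldl (fun acc p => PySem.Set.add acc p.1) acc
      = ps.foldl (fun acc p => if p.1 ∈ acc then acc else acc ++ [p.1]) acc := by
  simp only [PySem.Set.add_eq_ite]

-- the keys of `accum` are the first-seen-order dedup that B's order loop builds
theorem keys_accum (ps : List (String × Int)) :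
    (accum ps PySem.Dict.empty).keys = orderB ps := by
  have hk : (accum ps PySem.Dict.empty).keys
      = PySem.Set.update (PySem.Dict.empty : PySem.Dict String Int).keys (ps.map (·.1)) :=
    PySem.Dict.keys_foldl_insert_key ps (·.1) _ _
  rw [hk]
  show PySem.Set.update ([] : List String) (ps.map (·.1)) = orderB ps
  unfold PySem.Set.update orderB
  rw [List.foldl_map, foldl_add_key_eq]

theorem nodup_keys_accum (ps : List (String × Int)) :
    (accum ps PySem.Dict.empty).keys.Nodup :=
  PySem.Dict.nodup_keys_foldl_insert_key ps (·.1) _ _ PySem.Dict.nodup_keys_empty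

-- items of the accumulation = B's group-by output
theorem items_accum (ps : List (String × Int)) :
    (accum ps PySem.Dict.empty).items
      = (orderB ps).map (fun h => (h, ((ps.filter (fun p => p.1 == h)).map (·.2)).sum)) := by
  rw [PySem.Dict.items_eq_map_keys _ (nodup_keys_accum ps) 0, keys_accum]
  apply List.map_congr_left
  intro h _
  rw [getD_accum]
  simp [PySem.Dict.getD_empty]

-- ===== VERDICT =====
theorem parse_pairs_input_spec : Claim_equal_parse_pairs_input := by
  intro args_dict _ hpre
  unfold Spec_parse_pairs_input parse_pairs_input parse_pairs_input_alt
  have hall : args_dict.all (fun p => p.1 == "" || (canonB.get? (PySem.Str.lower p.1)).isSome) = true := by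
    rw [List.all_eq_true]
    intro p hp
    by_cases he : p.1 = ""
    · simp [he]
    · have hmem := hpre p hp he
      rw [canonB_get?_eq_matchA]
      have : (matchA p.1).isSome := by
        unfold matchA
        rw [List.find?_isSome]
        obtain ⟨h, hh, hlow⟩ := List.mem_map.mp hmem
        exact ⟨h, hh, by simp [hlow]⟩
      simp [this]
  rw [if_pos hall, goA_eq_accum args_dict _ hpre, items_accum]
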